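-- pv_equiv track=rewrite | github.com/zois-tasoulas/algoExpert | medium/sunsetViews.py | sunset_views
-- ===== SOURCE A (Python) =====
-- def sunset_views(buildings, direction):
--     if not buildings:
--         return []
--
--     index_with_view = []
--
--     if direction == "WEST":
--         tallest_prev = buildings[0]
--         index_with_view.append(0)
--         for index in range(1, len(buildings)):
--             if buildings[index] > tallest_prev:
--                 tallest_prev = buildings[index]
--                 index_with_view.append(index)
--     elif direction == "EAST":
--         tallest_prev = buildings[-1]
--         index_with_view.append(len(buildings) - 1)
--         for index in range(len(buildings) - 2, -1, -1):
--             if buildings[index] > tallest_prev: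
--                 tallest_prev = buildings[index]
--                 index_with_view.append(index)
--
--         index_with_view.reverse()
--
--     else:
--         raise Exception("Unexpected direction received")
--
--     return index_with_view
-- ===== SOURCE B (Python) =====
-- def sunset_views(buildings, direction):
--     if not buildings:
--         return []
--
--     stack = []
--
--     if direction == "WEST":
--         for index in range(len(buildings) - 1, -1, -1):
--             while stack and buildings[stack[-1]] <= buildings[index]:
--                 stack.pop()
--             stack.append(index)
--         stack.reverse()
--     elif direction == "EAST":
--         for index in range(len(buildings)):
--             while stack and buildings[stack[-1]] <= buildings[index]:
--                 stack.pop()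
--             stack.append(index)
--     else:
--         raise Exception("Unexpected direction received")
--
--     return stack
-- ===== Notes on version B (the rewrite author's own statement) =====
-- stated objective: alternative
-- what changed: Replaces the running-maximum scans with a monotonic stack scanned in the opposite direction per case (right-to-left for WEST, left-to-right for EAST), popping indices whose height is <= the current building.
import Mathlib
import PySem

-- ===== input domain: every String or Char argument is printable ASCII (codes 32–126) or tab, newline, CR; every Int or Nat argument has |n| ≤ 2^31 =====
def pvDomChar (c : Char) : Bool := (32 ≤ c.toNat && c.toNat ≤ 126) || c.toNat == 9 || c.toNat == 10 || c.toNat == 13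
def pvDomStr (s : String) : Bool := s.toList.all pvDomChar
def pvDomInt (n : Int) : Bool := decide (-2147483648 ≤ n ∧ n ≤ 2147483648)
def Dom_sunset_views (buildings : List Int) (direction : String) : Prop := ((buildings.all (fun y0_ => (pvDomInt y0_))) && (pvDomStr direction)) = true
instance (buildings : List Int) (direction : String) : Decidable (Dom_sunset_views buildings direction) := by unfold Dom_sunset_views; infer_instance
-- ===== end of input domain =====

-- B replaces A's two running-maximum scans by a monotonic stack scanned in the opposite
-- direction per case (alternative algorithm, same O(n) cost); equal returns proved on Pre_.

-- ===== PORT A =====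
-- literal transliteration of A: running maximum 'tallest_prev' plus an index accumulator,
-- scanning left-to-right for WEST and right-to-left (then reversing) for EAST.
def sunset_views (buildings : List Int) (direction : String) : List Int :=
  if buildings = [] then []
  else if direction = "WEST" then
    ((PySem.List.pyRange 1 (buildings.length : Int) 1).foldl
      (fun st index =>
        if st.1 < PySem.List.pyGetD buildings index 0 then
          (PySem.List.pyGetD buildings index 0, st.2 ++ [index])
        else st)
      (PySem.List.pyGetD buildings 0 0, [(0 : Int)])).2
  else if direction = "EAST" then
    ((PySem.List.pyRange ((buildings.length : Int) - 2) (-1) (-1)).foldl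
      (fun st index =>
        if st.1 < PySem.List.pyGetD buildings index 0 then
          (PySem.List.pyGetD buildings index 0, st.2 ++ [index])
        else st)
      (PySem.List.pyGetD buildings (-1) 0, [(buildings.length : Int) - 1])).2.reverse
  else []  -- Python raises here; excluded by Pre_

-- ===== PORT B =====
-- the stack keeps Python's stack[-1] (its top) at the HEAD: Python's append/pop at the end
-- are cons/tail here, so a Lean stack reads as the reverse of the Python list.
-- the inner 'while stack and buildings[stack[-1]] <= buildings[index]: stack.pop()' loop:
def popLE (buildings : List Int) (h : Int) : List Int → List Int
  | [] => []
  | j :: rest => if PySem.List.pyGetD buildings j 0 ≤ h then popLE buildings h rest else j :: rest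

def sunset_views_alt (buildings : List Int) (direction : String) : List Int :=
  if buildings = [] then []
  else if direction = "WEST" then
    -- Python's final stack.reverse() of its end-top stack is this head-top stack read as is
    (PySem.List.pyRange ((buildings.length : Int) - 1) (-1) (-1)).foldl
      (fun st index => index :: popLE buildings (PySem.List.pyGetD buildings index 0) st) []
  else if direction = "EAST" then
    -- Python returns its end-top stack unreversed, i.e. this head-top stack reversed
    ((PySem.List.pyRange 0 (buildings.length : Int) 1).foldl
      (fun st index => index :: popLE buildings (PySem.List.pyGetD buildings index 0) st) []).reverse
  else []  -- Python raises here; excluded by Pre_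

-- ===== PRECONDITION & SPEC =====
-- Pre_ excludes exactly the inputs where Python A raises ('Unexpected direction received'):
-- a nonempty list with a direction other than "WEST"/"EAST" (B raises there too).
def Pre_sunset_views (buildings : List Int) (direction : String) : Prop :=
  buildings = [] ∨ direction = "WEST" ∨ direction = "EAST"
instance (buildings : List Int) (direction : String) : Decidable (Pre_sunset_views buildings direction) := by unfold Pre_sunset_views; infer_instance

def pvWitness_sunset_views : List Int × String := ([3, 1, 2], "WEST")

def Spec_sunset_views (buildings : List Int) (direction : String) (out : List Int) : Prop := out = sunset_views_alt buildings direction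
instance (buildings : List Int) (direction : String) (out : List Int) : Decidable (Spec_sunset_views buildings direction out) := by unfold Spec_sunset_views; infer_instance

-- ===== CLAIM (what is proved, stated in full; the proofs are below) =====
def Claim_equal_sunset_views : Prop := ∀ (buildings : List Int) (direction : String), Dom_sunset_views buildings direction → Pre_sunset_views buildings direction → Spec_sunset_views buildings direction (sunset_views buildings direction)

-- ===== LEMMAS AND PROOFS =====

lemma foldlmax_swap (l : List Int) : ∀ a b : Int, l.foldl max (max a b) = max (l.foldl max a) b := by
  induction l with
  | nil => intro a b; simp
  | cons c l ih => intro a b; simp only [List.foldl_cons]; rw [max_right_comm]; exact ih (max a c) b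

lemma getD_of_drop (xs : List Int) (k : Nat) (y : Int) (ys : List Int)
    (h : xs.drop k = y :: ys) : PySem.List.pyGetD xs (k : Int) 0 = y := by
  have h0 : xs[k]? = some y := by
    have h1 : (xs.drop k)[0]? = xs[k + 0]? := List.getElem?_drop
    rw [h] at h1; simpa using h1.symm
  simp [PySem.List.pyGetD_natCast, List.getD_eq_getElem?_getD, h0]

lemma getD_of_prefix (xs : List Int) (k : Nat) (y : Int) (ys : List Int)
    (h : (y :: ys) <+: xs.drop k) : PySem.List.pyGetD xs (k : Int) 0 = y := by
  obtain ⟨t, ht⟩ := h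
  exact getD_of_drop xs k y (ys ++ t) (by rw [← ht]; simp)
def recs : Int → List Int → Nat → List Int
  | _, [], _ => []
  | t, y :: ys, k => if t < y then (k : Int) :: recs y ys (k + 1) else recs t ys (k + 1)

def wrec (b : List Int) : List Int → Nat → List Int
  | [], _ => []
  | y :: ys, k => (k : Int) :: popLE b y (wrec b ys (k + 1))

lemma drop_succ_of_drop (b : List Int) (k : Nat) (y : Int) (ys : List Int)
    (h : b.drop k = y :: ys) : b.drop (k + 1) = ys := by
  have h1 : List.drop 1 (List.drop k b) = List.drop (k + 1) b := List.drop_drop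
  rw [h] at h1; simpa using h1.symm

lemma lt_length_of_drop (b : List Int) (k : Nat) (y : Int) (ys : List Int)
    (h : b.drop k = y :: ys) : k < b.length := by
  by_contra hk
  rw [List.drop_eq_nil_of_le (by omega)] at h; cases h

lemma foldA (b : List Int) : ∀ (ys : List Int) (k : Nat) (t : Int) (acc : List Int),
    b.drop k = ys →
    (PySem.List.pyRange (k : Int) (b.length : Int) 1).foldl
      (fun st index =>
        if st.1 < PySem.List.pyGetD b index 0 then
          (PySem.List.pyGetD b index 0, st.2 ++ [index])
        else st) (t, acc)
    = (ys.foldl max t, acc ++ recs t ys k) := by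
  intro ys
  induction ys with
  | nil =>
    intro k t acc h
    rw [PySem.List.pyRange_one_eq_nil (by
      have := List.drop_eq_nil_iff.mp h; exact_mod_cast this)]
    simp [recs]
  | cons y ys ih =>
    intro k t acc h
    have hk : k < b.length := lt_length_of_drop b k y ys h
    rw [PySem.List.pyRange_one_cons (by exact_mod_cast hk)]
    rw [List.foldl_cons]
    rw [getD_of_drop b k y ys h]
    have hcast : (k : Int) + 1 = ((k + 1 : Nat) : Int) := by push_cast; ring
    rw [hcast]
    have hdrop : b.drop (k + 1) = ys := drop_succ_of_drop b k y ys h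
    by_cases hty : t < y
    · simp only [if_pos hty]
      rw [ih (k + 1) y (acc ++ [(k : Int)]) hdrop]
      simp [recs, if_pos hty, max_eq_right (le_of_lt hty)]
    · simp only [if_neg hty]
      rw [ih (k + 1) t acc hdrop]
      simp [recs, if_neg hty, max_eq_left (le_of_not_gt hty)]

lemma foldBW (b : List Int) : ∀ (ys : List Int) (k : Nat),
    b.drop k = ys →
    (PySem.List.pyRange (k : Int) (b.length : Int) 1).foldr
      (fun index st => index :: popLE b (PySem.List.pyGetD b index 0) st) []
    = wrec b ys k := by
  intro ys
  induction ys with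
  | nil =>
    intro k h
    rw [PySem.List.pyRange_one_eq_nil (by
      have := List.drop_eq_nil_iff.mp h; exact_mod_cast this)]
    simp [wrec]
  | cons y ys ih =>
    intro k h
    have hk : k < b.length := lt_length_of_drop b k y ys h
    rw [PySem.List.pyRange_one_cons (by exact_mod_cast hk)]
    rw [List.foldr_cons]
    have hcast : (k : Int) + 1 = ((k + 1 : Nat) : Int) := by push_cast; ring
    rw [hcast, ih (k + 1) (drop_succ_of_drop b k y ys h), getD_of_drop b k y ys h]
    simp [wrec]

lemma popLE_recs (b : List Int) : ∀ (ys : List Int) (k : Nat) (s t : Int),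
    s ≤ t → b.drop k = ys → popLE b t (recs s ys k) = recs t ys k := by
  intro ys
  induction ys with
  | nil => intro k s t _ _; simp [recs, popLE]
  | cons y ys ih =>
    intro k s t hst h
    have hdrop : b.drop (k + 1) = ys := drop_succ_of_drop b k y ys h
    by_cases hsy : s < y
    · simp only [recs, if_pos hsy]
      by_cases hty : t < y
      · simp [popLE, getD_of_drop b k y ys h, not_le.mpr hty, if_pos hty]
      · simp only [popLE, getD_of_drop b k y ys h, if_pos (le_of_not_gt hty)]
        rw [ih (k + 1) y t (le_of_not_gt hty) hdrop]
        simp [if_neg hty]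
    · have hyt : ¬ t < y := by omega
      simp only [recs, if_neg hsy, if_neg hyt]
      exact ih (k + 1) s t hst hdrop

lemma popLE_wrec (b : List Int) : ∀ (ys : List Int) (k : Nat) (t : Int),
    b.drop k = ys → popLE b t (wrec b ys k) = recs t ys k := by
  intro ys
  induction ys with
  | nil => intro k t _; simp [wrec, recs, popLE]
  | cons y ys ih =>
    intro k t h
    have hdrop : b.drop (k + 1) = ys := drop_succ_of_drop b k y ys h
    by_cases hty : t < y
    · simp [wrec, popLE, getD_of_drop b k y ys h, not_le.mpr hty, recs, if_pos hty,
        ih (k + 1) y hdrop]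
    · simp only [wrec, popLE, getD_of_drop b k y ys h, if_pos (le_of_not_gt hty)]
      rw [ih (k + 1) y hdrop, popLE_recs b ys (k + 1) y t (le_of_not_gt hty) hdrop]
      simp [recs, if_neg hty]
def esteps (b : List Int) : List Int → Nat → Int → List Int → (Int × List Int)
  | [], _, t, a => (t, a)
  | y :: ys, k, t, a =>
    let r := esteps b ys (k + 1) t a
    if r.1 < y then (y, r.2 ++ [(k : Int)]) else r

def bsteps (b : List Int) : List Int → Nat → List Int → List Int
  | [], _, st => st
  | y :: ys, k, st => bsteps b ys (k + 1) ((k : Int) :: popLE b y st)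

def erecs : Int → List Int → Nat → List Int
  | _, [], _ => []
  | t, y :: ys, k => erecs t ys (k + 1) ++ (if ys.foldl max t < y then [(k : Int)] else [])

lemma prefix_succ (b : List Int) (k : Nat) (y : Int) (ys : List Int)
    (h : (y :: ys) <+: b.drop k) : ys <+: b.drop (k + 1) := by
  obtain ⟨r, hr⟩ := h
  have h1 : b.drop (k + 1) = ys ++ r := drop_succ_of_drop b k y (ys ++ r) hr.symm
  exact h1 ▸ List.prefix_append ys r

lemma foldAE (b : List Int) (m : Nat) : ∀ (ys : List Int) (k : Nat) (t : Int) (a : List Int),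
    ys <+: b.drop k → k + ys.length = m →
    (PySem.List.pyRange (k : Int) (m : Int) 1).foldr
      (fun index st =>
        if st.1 < PySem.List.pyGetD b index 0 then
          (PySem.List.pyGetD b index 0, st.2 ++ [index])
        else st) (t, a)
    = esteps b ys k t a := by
  intro ys
  induction ys with
  | nil =>
    intro k t a _ hm
    rw [PySem.List.pyRange_one_eq_nil (by simp at hm; omega)]
    simp [esteps]
  | cons y ys ih =>
    intro k t a hpre hm
    have hk : (k : Int) < (m : Int) := by simp at hm ⊢; omega
    rw [PySem.List.pyRange_one_cons hk, List.foldr_cons]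
    have hcast : (k : Int) + 1 = ((k + 1 : Nat) : Int) := by push_cast; ring
    rw [hcast, ih (k + 1) t a (prefix_succ b k y ys hpre) (by simp at hm ⊢; omega)]
    rw [getD_of_prefix b k y ys hpre]
    simp [esteps]

lemma esteps_eq (b : List Int) : ∀ (ys : List Int) (k : Nat) (t : Int) (a : List Int),
    esteps b ys k t a = (ys.foldl max t, a ++ erecs t ys k) := by
  intro ys
  induction ys with
  | nil => intro k t a; simp [esteps, erecs]
  | cons y ys ih =>
    intro k t a
    simp only [esteps, ih (k + 1) t a, erecs, List.foldl_cons]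
    have h1 : ys.foldl max (max t y) = max (ys.foldl max t) y := foldlmax_swap ys t y
    by_cases hc : ys.foldl max t < y
    · simp [if_pos hc, h1, max_eq_right (le_of_lt hc)]
    · simp [if_neg hc, h1, max_eq_left (le_of_not_gt hc)]

lemma foldBE (b : List Int) : ∀ (ys : List Int) (k : Nat) (st : List Int),
    b.drop k = ys →
    (PySem.List.pyRange (k : Int) (b.length : Int) 1).foldl
      (fun st index => index :: popLE b (PySem.List.pyGetD b index 0) st) st
    = bsteps b ys k st := by
  intro ys
  induction ys with
  | nil =>
    intro k st h
    rw [PySem.List.pyRange_one_eq_nil (by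
      have := List.drop_eq_nil_iff.mp h; exact_mod_cast this)]
    simp [bsteps]
  | cons y ys ih =>
    intro k st h
    have hk : k < b.length := lt_length_of_drop b k y ys h
    rw [PySem.List.pyRange_one_cons (by exact_mod_cast hk), List.foldl_cons]
    have hcast : (k : Int) + 1 = ((k + 1 : Nat) : Int) := by push_cast; ring
    rw [getD_of_drop b k y ys h, hcast, ih (k + 1) _ (drop_succ_of_drop b k y ys h)]
    simp [bsteps]

lemma bsteps_snoc (b : List Int) (y : Int) : ∀ (ys : List Int) (k : Nat) (st : List Int),
    bsteps b (ys ++ [y]) k st = ((k + ys.length : Nat) : Int) :: popLE b y (bsteps b ys k st) := by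
  intro ys
  induction ys with
  | nil => intro k st; simp [bsteps]
  | cons z ys ih =>
    intro k st
    simp only [List.cons_append, bsteps, ih (k + 1)]
    congr 2
    simp only [List.length_cons]
    omega

lemma erecs_snoc (z : Int) : ∀ (q : List Int) (t : Int) (k : Nat),
    erecs t (q ++ [z]) k
    = (if t < z then [((k + q.length : Nat) : Int)] else []) ++ erecs (max t z) q k := by
  intro q
  induction q with
  | nil => intro t k; simp [erecs]
  | cons y q ih =>
    intro t k
    simp only [List.cons_append, erecs, ih t (k + 1)]
    have h1 : (q ++ [z]).foldl max t = q.foldl max (max t z) := by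
      rw [List.foldl_append, foldlmax_swap]; simp [max_comm]
    rw [h1]
    have h2 : ((k + 1 + q.length : Nat) : Int) = ((k + (q.length + 1) : Nat) : Int) := by push_cast; ring
    by_cases hc : t < z
    · simp only [if_pos hc, h2]
      by_cases hy : q.foldl max (max t z) < y <;> simp [hy]
    · simp only [if_neg hc]
      by_cases hy : q.foldl max (max t z) < y <;> simp [hy]

lemma erecs_nil_of_le : ∀ (q : List Int) (t : Int) (k : Nat),
    q.foldl max t ≤ t → erecs t q k = [] := by
  intro q
  induction q with
  | nil => intro t k _; simp [erecs]
  | cons y q ih =>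
    intro t k h
    simp only [List.foldl_cons, foldlmax_swap q t y, max_le_iff] at h
    have h1 : q.foldl max t ≤ t := h.1
    have h2 : t ≤ q.foldl max t := (PySem.List.le_foldl_max q t).1
    simp only [erecs, ih t (k + 1) h1]
    have : ¬ q.foldl max t < y := by omega
    simp [this]

lemma foldl_le_of_erecs_nil : ∀ (q : List Int) (t : Int) (k : Nat),
    erecs t q k = [] → q.foldl max t ≤ t := by
  intro q
  induction q with
  | nil => intro t k _; simp
  | cons y q ih =>
    intro t k h
    simp only [erecs, List.append_eq_nil_iff] at h
    obtain ⟨h1, h2⟩ := h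
    have h3 : q.foldl max t ≤ t := ih t (k + 1) h1
    have h4 : ¬ q.foldl max t < y := by
      intro hc; simp [if_pos hc] at h2
    simp only [List.foldl_cons]
    rw [foldlmax_swap q t y]
    omega

lemma popLE_append (b : List Int) (t : Int) : ∀ (l m : List Int),
    popLE b t (l ++ m) = if popLE b t l = [] then popLE b t m else popLE b t l ++ m := by
  intro l
  induction l with
  | nil => intro m; simp [popLE]
  | cons j l ih =>
    intro m
    by_cases hj : PySem.List.pyGetD b j 0 ≤ t
    · simp only [List.cons_append, popLE, if_pos hj, ih m]
    · simp [popLE, if_neg hj]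

lemma popLE_erecs (b : List Int) : ∀ (q : List Int) (k : Nat) (s t : Int),
    s ≤ t → q <+: b.drop k → popLE b t (erecs s q k) = erecs t q k := by
  intro q
  induction q with
  | nil => intro k s t _ _; simp [erecs, popLE]
  | cons y q ih =>
    intro k s t hst hpre
    have hpre' : q <+: b.drop (k + 1) := prefix_succ b k y q hpre
    have hlk : PySem.List.pyGetD b (k : Int) 0 = y := getD_of_prefix b k y q hpre
    have hEt : popLE b t (erecs s q (k + 1)) = erecs t q (k + 1) := ih (k + 1) s t hst hpre'
    have hm : q.foldl max t = max (q.foldl max s) t := by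
      rw [← foldlmax_swap, max_eq_right hst]
    simp only [erecs]
    rw [popLE_append]
    by_cases hnil : erecs t q (k + 1) = []
    · rw [hEt, hnil, if_pos rfl]
      have hft : q.foldl max t ≤ t := foldl_le_of_erecs_nil q t (k + 1) hnil
      have hfs : q.foldl max s ≤ t := by rw [hm] at hft; omega
      have htle : t ≤ q.foldl max t := (PySem.List.le_foldl_max q t).1
      by_cases hcs : q.foldl max s < y
      · simp only [if_pos hcs, popLE, hlk]
        by_cases hyt : y ≤ t
        · have : ¬ q.foldl max t < y := by omega
          simp [hyt, this]
        · have : q.foldl max t < y := by omega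
          simp [hyt, this]
      · have : ¬ q.foldl max t < y := by omega
        simp [hcs, this, popLE]
    · rw [hEt, if_neg hnil]
      have hgt : t < q.foldl max t := by
        by_contra hc
        exact hnil (erecs_nil_of_le q t (k + 1) (by omega))
      have hcond : q.foldl max t = q.foldl max s := by
        rcases le_total (List.foldl max s q) t with hle | hle
        · rw [hm, max_eq_right hle] at hgt; exact absurd hgt (lt_irrefl t)
        · rw [hm, max_eq_left hle]
      rw [hcond]
lemma bsteps_prefix (b : List Int) : ∀ (q : List Int), q <+: b →
    ∀ (t : Int), popLE b t (bsteps b q 0 []) = erecs t q 0 := by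
  intro q
  induction q using List.reverseRecOn with
  | nil => intro _ t; simp [bsteps, popLE, erecs]
  | append_singleton q z ih =>
    intro hpre t
    have hq : q <+: b := (List.prefix_append q [z]).trans hpre
    have hlk : PySem.List.pyGetD b ((q.length : Nat) : Int) 0 = z := by
      obtain ⟨r, hr⟩ := hpre
      refine getD_of_prefix b q.length z r ?_
      have : b.drop q.length = z :: r := by
        rw [← hr, List.append_assoc, List.singleton_append, List.drop_left]
      rw [this]
    rw [bsteps_snoc, erecs_snoc]
    simp only [Nat.zero_add]
    by_cases hzt : z ≤ t
    · simp only [popLE, hlk, if_pos hzt, ih hq z]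
      rw [popLE_erecs b q 0 z t hzt (by simpa using hq)]
      simp [max_eq_left hzt, not_lt.mpr hzt]
    · simp only [popLE, hlk, if_neg hzt, ih hq z]
      simp [max_eq_right (le_of_not_ge hzt), if_pos (lt_of_not_ge hzt)]
lemma sunset_views_eq_alt : ∀ (b : List Int) (d : String),
    (b = [] ∨ d = "WEST" ∨ d = "EAST") → sunset_views b d = sunset_views_alt b d := by
  intro b d hpre
  by_cases hb : b = []
  · simp [sunset_views, sunset_views_alt, hb]
  rcases hpre with h | h | h
  · exact absurd h hb
  · -- WEST
    subst h
    cases b with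
    | nil => exact absurd rfl hb
    | cons y ys =>
      simp only [sunset_views, sunset_views_alt, if_neg hb]
      have ht : PySem.List.pyGetD (y :: ys) (0 : Int) 0 = y := by
        exact_mod_cast getD_of_drop (y :: ys) 0 y ys rfl
      have hA := foldA (y :: ys) ys 1 y [(0 : Int)] (by simp)
      rw [Nat.cast_one] at hA
      rw [ht, hA]
      have hr : PySem.List.pyRange (((y :: ys).length : Int) - 1) (-1) (-1)
          = (PySem.List.pyRange 0 ((y :: ys).length : Int) 1).reverse := by
        rw [PySem.List.pyRange_neg_one_eq_reverse]; norm_num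
      rw [hr, List.foldl_reverse]
      have hB := foldBW (y :: ys) (y :: ys) 0 (by simp)
      rw [Nat.cast_zero] at hB
      rw [hB]
      simp only [wrec]
      rw [popLE_wrec (y :: ys) ys 1 y (by simp)]
      simp
  · -- EAST
    subst h
    obtain ⟨q, z, rfl⟩ := (List.eq_nil_or_concat b).resolve_left hb
    rw [List.concat_eq_append] at hb ⊢
    simp only [sunset_views, sunset_views_alt]
    rw [if_neg hb, if_neg hb, if_neg (show ¬ ("EAST" : String) = "WEST" by decide),
      if_neg (show ¬ ("EAST" : String) = "WEST" by decide)]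
    simp only [if_true]
    have ht : PySem.List.pyGetD (q ++ [z]) (-1) 0 = z := by
      simp [PySem.List.pyGetD, PySem.List.pyGet?_neg_one]
    have hl1 : (((q ++ [z]).length : Nat) : Int) - 1 = ((q.length : Nat) : Int) := by simp
    have hr : PySem.List.pyRange (((q ++ [z]).length : Int) - 2) (-1) (-1)
        = (PySem.List.pyRange 0 ((q.length : Nat) : Int) 1).reverse := by
      rw [PySem.List.pyRange_neg_one_eq_reverse]
      congr 2
      simp
      ring
    rw [ht, hl1, hr, List.foldl_reverse]
    have hq : q <+: (q ++ [z]) := List.prefix_append q [z]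
    have hAE := foldAE (q ++ [z]) q.length q 0 z [(q.length : Int)] (by simp) (by simp)
    rw [Nat.cast_zero] at hAE
    rw [hAE, esteps_eq]
    have hB := foldBE (q ++ [z]) (q ++ [z]) 0 [] (by simp)
    rw [Nat.cast_zero] at hB
    rw [hB, bsteps_snoc]
    rw [bsteps_prefix (q ++ [z]) q hq z]
    simp

-- ===== VERDICT (by name: the statement is the Claim_ definition above) =====
theorem sunset_views_spec : Claim_equal_sunset_views := by
  intro buildings direction _ hpre
  unfold Spec_sunset_views
  exact sunset_views_eq_alt buildings direction hpre
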